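-- pv_equiv track=rewrite | github.com/EnterTheNameHere/Turnix | backend/core/dictpath.py | _splitPathWithEscapes
-- ===== SOURCE A (Python) =====
-- def _splitPathWithEscapes(path: str) -> list[str]:
--     """
--     Splits a dotted/slashed path where '.' and '/' are segment separators,
--     and backslash '\\' escapes the next character (including separators).
--
--     Examples:
--       - a.b.c   -> ["a", "b", "c"]
--       - a\\.b/c -> ["a.b", "c"]
--     """
--     parts: list[str] = []
--     curr: list[str] = []
--     esc = False
--     for ch in path or "":
--         if esc:
--             curr.append(ch)
--             esc = False
--             continue
--         if ch == "\\":
--             esc = True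
--             continue
--         if ch in (".", "/"):
--             # Segment boundary
--             parts.append("".join(curr))
--             curr = []
--             continue
--         curr.append(ch)
--     # If escape was left dangling (e.g., "a\\")
--     if esc:
--         # Signal invalid path via a ValueError. Callers that want "not found" can catch it
--         raise ValueError("Path ends with a dangling escape (trailing backslash)")
--     # Push last segment (even if empty - validated later)
--     parts.append("".join(curr))
--     return parts
-- ===== SOURCE B (Python) =====
-- def _splitPathWithEscapes(path: str) -> list[str]:
--     """Decode-then-split: first decode backslash escapes into tagged characters,
--     then split on untagged '.'/'/' separators."""
--     s = path or ""
--     # Pass 1: decode escapes into (char, escaped) pairs; a trailing lone backslash is invalid.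
--     decoded = []
--     i = 0
--     n = len(s)
--     while i < n:
--         if s[i] == "\\":
--             if i + 1 >= n:
--                 raise ValueError("Path ends with a dangling escape (trailing backslash)")
--             decoded.append((s[i + 1], True))
--             i += 2
--         else:
--             decoded.append((s[i], False))
--             i += 1
--     # Pass 2: split on unescaped separators.
--     parts = []
--     buf = []
--     for ch, escaped in decoded:
--         if not escaped and ch in (".", "/"):
--             parts.append("".join(buf))
--             buf = []
--         else:
--             buf.append(ch)
--     parts.append("".join(buf))
--     return parts
-- ===== Notes on version B (the rewrite author's own statement) =====
-- stated objective: alternative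
-- what changed: Replaced A's single-pass state machine carrying an esc flag by a two-pass decode-then-split: pass 1 decodes backslash escapes into (char, escaped) pairs (raising on a dangling trailing backslash), pass 2 splits on unescaped separators.
import Mathlib
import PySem

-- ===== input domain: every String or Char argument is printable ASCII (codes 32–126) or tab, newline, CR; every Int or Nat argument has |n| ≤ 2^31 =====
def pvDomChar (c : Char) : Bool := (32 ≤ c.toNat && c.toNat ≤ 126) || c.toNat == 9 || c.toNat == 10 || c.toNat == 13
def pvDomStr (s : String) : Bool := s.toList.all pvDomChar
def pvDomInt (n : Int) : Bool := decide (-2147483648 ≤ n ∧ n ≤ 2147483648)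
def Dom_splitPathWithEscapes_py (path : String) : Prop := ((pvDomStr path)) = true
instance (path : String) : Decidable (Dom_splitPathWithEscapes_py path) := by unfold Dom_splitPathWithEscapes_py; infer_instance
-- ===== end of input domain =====

-- B replaces A's single-pass esc-flag state machine by a decode-then-split two-pass algorithm (alternative decomposition, same cost).
-- Both raise ValueError on a dangling trailing backslash; Pre_ excludes exactly those inputs.

-- ===== PORT A =====
-- one loop step of A: state = (parts, curr, esc)
def pvStepA (st : List String × List Char × Bool) (ch : Char) : List String × List Char × Bool :=
  if st.2.2 then (st.1, st.2.1 ++ [ch], false)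
  else if ch = '\\' then (st.1, st.2.1, true)
  else if ch = '.' ∨ ch = '/' then (st.1 ++ [String.mk st.2.1], [], false)
  else (st.1, st.2.1 ++ [ch], false)

def splitPathWithEscapes_py (path : String) : List String :=
  (path.toList.foldl pvStepA ([], [], false)).1 ++
    [String.mk (path.toList.foldl pvStepA ([], [], false)).2.1]

-- ===== PORT B =====
-- pass 1 of B: decode escapes into (char, escaped) pairs; none = ValueError on dangling escape
def pvDecode : List Char → Option (List (Char × Bool))
  | [] => some []
  | c :: rest =>
    if c = '\\' then
      match rest with
      | [] => none
      | c2 :: rest2 => (pvDecode rest2).map (fun ds => (c2, true) :: ds)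
    else (pvDecode rest).map (fun ds => (c, false) :: ds)

-- pass 2 of B: one split step, state = (parts, buf)
def pvStepB (st : List String × List Char) (p : Char × Bool) : List String × List Char :=
  if ¬ p.2 ∧ (p.1 = '.' ∨ p.1 = '/') then (st.1 ++ [String.mk st.2], [])
  else (st.1, st.2 ++ [p.1])

def splitPathWithEscapes_py_alt (path : String) : List String :=
  match pvDecode path.toList with
  | none => []   -- unreachable under Pre_ (B raises ValueError there, like A)
  | some ds =>
      (ds.foldl pvStepB ([], [])).1 ++ [String.mk (ds.foldl pvStepB ([], [])).2]

-- ===== PRECONDITION & SPEC =====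
-- Pre_ excludes exactly the inputs on which A raises ValueError: paths whose maximal
-- trailing run of backslashes has odd length (a dangling escape). B raises there too.
def Pre_splitPathWithEscapes_py (path : String) : Prop :=
  (path.toList.reverse.takeWhile (· == '\\')).length % 2 = 0
instance (path : String) : Decidable (Pre_splitPathWithEscapes_py path) := by
  unfold Pre_splitPathWithEscapes_py; infer_instance

def pvWitness_splitPathWithEscapes_py : String := "a\\.b/c"

def Spec_splitPathWithEscapes_py (path : String) (out : List String) : Prop := out = splitPathWithEscapes_py_alt path
instance (path : String) (out : List String) : Decidable (Spec_splitPathWithEscapes_py path out) := by unfold Spec_splitPathWithEscapes_py; infer_instance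

-- ===== CLAIM (what is proved, stated in full; the proofs are below) =====
def Claim_equal_splitPathWithEscapes_py : Prop := ∀ (path : String), Dom_splitPathWithEscapes_py path → Pre_splitPathWithEscapes_py path → Spec_splitPathWithEscapes_py path (splitPathWithEscapes_py path)

-- ===== LEMMAS AND PROOFS =====

-- parity of the trailing backslash run is unchanged by takeWhile over an appended pair
theorem pv_tw_parity_pair (xs : List Char) (c : Char) :
    ((xs ++ [c, '\\']).takeWhile (· == '\\')).length % 2
      = (xs.takeWhile (· == '\\')).length % 2 := by
  rw [List.takeWhile_append]
  split
  · rename_i hlen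
    have hx : xs.takeWhile (· == '\\') = xs :=
      (List.takeWhile_prefix _).eq_of_length hlen
    rw [hx]
    by_cases hc : c = '\\'
    · subst hc
      simp [List.takeWhile]
    · have hb : (c == '\\') = false := by simp [hc]
      simp [List.takeWhile, hb]
  · rfl

theorem pv_tw_nonbs (xs : List Char) (c : Char) (h : ¬ c = '\\') :
    (xs ++ [c]).takeWhile (· == '\\') = xs.takeWhile (· == '\\') := by
  rw [List.takeWhile_append]
  split
  · rename_i hlen
    have hx : xs.takeWhile (· == '\\') = xs :=
      (List.takeWhile_prefix _).eq_of_length hlen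
    rw [hx]
    have hb : (c == '\\') = false := by simp [h]
    simp [List.takeWhile, hb]
  · rfl

-- pvDecode fails exactly when the trailing backslash run has odd length
theorem pv_decode_none_iff (l : List Char) :
    pvDecode l = none ↔ (l.reverse.takeWhile (· == '\\')).length % 2 = 1 := by
  fun_induction pvDecode l
  case case1 => simp
  case case2 => simp [List.takeWhile]
  case case3 c2 rest2 ih =>
    have hrev : ('\\' :: c2 :: rest2).reverse = rest2.reverse ++ [c2, '\\'] := by simp
    rw [hrev, pv_tw_parity_pair]
    simpa [Option.map_eq_none_iff] using ih
  case case4 =>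
    rename_i c rest hc ih
    have hrev : (c :: rest).reverse = rest.reverse ++ [c] := by simp
    rw [hrev, pv_tw_nonbs _ _ hc]
    simpa [Option.map_eq_none_iff] using ih

-- A's fold from an esc-false state equals B's split fold over the decoded list
theorem pv_foldA_foldB (l : List Char) :
    ∀ ds, pvDecode l = some ds → ∀ parts curr,
      l.foldl pvStepA (parts, curr, false)
        = ((ds.foldl pvStepB (parts, curr)).1, (ds.foldl pvStepB (parts, curr)).2, false) := by
  fun_induction pvDecode l
  case case1 =>
    intro ds h parts curr
    simp only [Option.some.injEq] at h
    subst h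
    rfl
  case case2 => intro ds h; simp at h
  case case3 c2 rest2 ih =>
    intro ds h parts curr
    obtain ⟨ds', hds', rfl⟩ := Option.map_eq_some_iff.mp h
    simp only [List.foldl_cons]
    rw [show pvStepA (parts, curr, false) '\\' = (parts, curr, true) from by simp [pvStepA]]
    rw [show pvStepA (parts, curr, true) c2 = (parts, curr ++ [c2], false) from by simp [pvStepA]]
    rw [show pvStepB (parts, curr) (c2, true) = (parts, curr ++ [c2]) from by simp [pvStepB]]
    exact ih ds' hds' parts (curr ++ [c2])
  case case4 =>
    rename_i c rest hc ih
    intro ds h parts curr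
    obtain ⟨ds', hds', rfl⟩ := Option.map_eq_some_iff.mp h
    simp only [List.foldl_cons]
    by_cases hsep : c = '.' ∨ c = '/'
    · rw [show pvStepA (parts, curr, false) c = (parts ++ [String.mk curr], [], false) from by
        simp [pvStepA, hc, hsep]]
      rw [show pvStepB (parts, curr) (c, false) = (parts ++ [String.mk curr], []) from by
        simp [pvStepB, hsep]]
      exact ih ds' hds' (parts ++ [String.mk curr]) []
    · rw [show pvStepA (parts, curr, false) c = (parts, curr ++ [c], false) from by
        simp [pvStepA, hc, hsep]]
      rw [show pvStepB (parts, curr) (c, false) = (parts, curr ++ [c]) from by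
        simp [pvStepB, hsep]]
      exact ih ds' hds' parts (curr ++ [c])

-- ===== VERDICT (by name: the statement is the Claim_ definition above) =====
theorem splitPathWithEscapes_py_spec : Claim_equal_splitPathWithEscapes_py := by
  intro path _hDom hPre
  unfold Spec_splitPathWithEscapes_py
  obtain ⟨ds, hds⟩ : ∃ ds, pvDecode path.toList = some ds := by
    cases h : pvDecode path.toList with
    | none =>
        exfalso
        have := (pv_decode_none_iff path.toList).mp h
        unfold Pre_splitPathWithEscapes_py at hPre
        omega
    | some ds => exact ⟨ds, rfl⟩
  simp only [splitPathWithEscapes_py, splitPathWithEscapes_py_alt, hds,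
    pv_foldA_foldB path.toList ds hds [] []]
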